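-- pv_equiv track=rewrite | github.com/tigantic/physics-os | ontic/sim/certification/do178c.py | _condition_has_independent_effect
-- ===== SOURCE A (Python) =====
-- def _condition_has_independent_effect(
--     condition: str, evaluations: list[dict[str, bool]]
-- ) -> bool:
--     """Check if a condition independently affects the decision."""
--     # Find pairs where only this condition differs
--     for i, eval1 in enumerate(evaluations):
--         for eval2 in evaluations[i + 1 :]:
--             differs_only_in_cond = True
--             cond_differs = False
--
--             for c in eval1:
--                 if c == condition:
--                     if eval1[c] != eval2[c]:
--                         cond_differs = True
--                 elif eval1[c] != eval2[c]:
--                     differs_only_in_cond = False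
--                     break
--
--             if differs_only_in_cond and cond_differs:
--                 return True
--
--     return False
-- ===== SOURCE B (Python) =====
-- def _condition_has_independent_effect(
--     condition: str, evaluations: list[dict[str, bool]]
-- ) -> bool:
--     """Check if a condition independently affects the decision.
--
--     One pass: group evaluations by their assignment to all *other*
--     conditions (a canonical sorted tuple); the condition has an
--     independent effect iff some group contains two different values
--     for `condition`.
--     """
--     seen = {}
--     for ev in evaluations:
--         key = tuple(sorted(
--             ((k, v) for k, v in ev.items() if k != condition),
--             key=lambda item: item[0],
--         ))
--         val = ev.get(condition)
--         if key in seen: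
--             if seen[key] != val:
--                 return True
--         else:
--             seen[key] = val
--     return False
-- ===== Notes on version B (the rewrite author's own statement) =====
-- stated objective: faster
-- what changed: Replaced the O(n^2) all-pairs scan (comparing every two evaluations key by key) with a single pass that groups each evaluation under a canonical sorted tuple of its non-condition items in a dict and flags a group that sees two different values for the condition.
-- outside the precondition, e.g. on _condition_has_independent_effect('a', [{'a': True}, {'a': False, 'b': True}]): A returns True, B returns False; on _condition_has_independent_effect('a', [{'b': True}, {'a': True, 'b': True}]): A returns False, B returns True
import Mathlib
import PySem

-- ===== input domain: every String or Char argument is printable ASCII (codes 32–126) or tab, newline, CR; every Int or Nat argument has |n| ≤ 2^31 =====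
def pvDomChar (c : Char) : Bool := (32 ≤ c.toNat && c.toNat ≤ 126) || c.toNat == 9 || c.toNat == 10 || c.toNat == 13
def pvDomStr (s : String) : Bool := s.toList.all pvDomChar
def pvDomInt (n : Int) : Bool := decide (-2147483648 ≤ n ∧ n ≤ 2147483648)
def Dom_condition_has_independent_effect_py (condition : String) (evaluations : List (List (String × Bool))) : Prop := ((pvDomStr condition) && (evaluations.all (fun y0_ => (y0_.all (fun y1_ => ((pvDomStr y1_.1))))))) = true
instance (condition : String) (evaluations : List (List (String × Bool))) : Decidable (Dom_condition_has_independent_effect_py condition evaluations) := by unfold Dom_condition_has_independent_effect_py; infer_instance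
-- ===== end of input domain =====

-- B replaces A's O(n²) all-pairs key-by-key scan by one dict-grouping pass over the
-- evaluations (asymptotically faster). Equality of the return value is proved on Pre_.

-- ===== PORT A =====
-- e[c] / e.get(c): first-match lookup in the association list viewed as a Python dict
def pvGet (e : List (String × Bool)) (c : String) : Option Bool :=
  PySem.Dict.get? ⟨e⟩ c

-- A's inner 'for c in eval1' loop: the two flags, with the 'break' on a differing other key
def pvInnerA (condition : String) (e1 e2 : List (String × Bool)) :
    List String → Bool → Bool → Bool × Bool
  | [], d, cd => (d, cd)
  | c :: cs, d, cd =>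
    if c = condition then
      if pvGet e1 c ≠ pvGet e2 c then pvInnerA condition e1 e2 cs d true
      else pvInnerA condition e1 e2 cs d cd
    else if pvGet e1 c ≠ pvGet e2 c then (false, cd)
    else pvInnerA condition e1 e2 cs d cd

-- 'differs_only_in_cond and cond_differs' for one pair (eval1, eval2)
def pvPairA (condition : String) (e1 e2 : List (String × Bool)) : Bool :=
  (pvInnerA condition e1 e2 (e1.map Prod.fst) true false).1 &&
  (pvInnerA condition e1 e2 (e1.map Prod.fst) true false).2

-- the two nested loops: 'for i, eval1 in enumerate(...)', 'for eval2 in evaluations[i+1:]'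
def pvOuterA (condition : String) : List (List (String × Bool)) → Bool
  | [] => false
  | e1 :: rest =>
    if rest.any (fun e2 => pvPairA condition e1 e2) then true
    else pvOuterA condition rest

def condition_has_independent_effect_py (condition : String) (evaluations : List (List (String × Bool))) : Bool :=
  pvOuterA condition evaluations

-- ===== PORT B =====
-- tuple(sorted(((k, v) for k, v in ev.items() if k != condition), key=lambda item: item[0]))
def pvKeyB (condition : String) (e : List (String × Bool)) : List (String × Bool) :=
  PySem.List.sorted (e.filter (fun p => p.1 ≠ condition)) (fun p => p.1) false

-- the single pass: 'seen' maps each group key to the condition value of its first member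
def pvLoopB (condition : String) :
    List (List (String × Bool)) → PySem.Dict (List (String × Bool)) (Option Bool) → Bool
  | [], _ => false
  | ev :: rest, seen =>
    match seen.get? (pvKeyB condition ev) with
    | some v => if v ≠ pvGet ev condition then true else pvLoopB condition rest seen
    | none => pvLoopB condition rest (seen.insert (pvKeyB condition ev) (pvGet ev condition))

def condition_has_independent_effect_py_alt (condition : String) (evaluations : List (List (String × Bool))) : Bool :=
  pvLoopB condition evaluations PySem.Dict.empty

-- ===== PRECONDITION & SPEC =====
-- inputs on which A's scan of a pair would hit a key the later evaluation lacks: A raises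
-- KeyError there unless a differing shared non-condition key breaks the scan first
abbrev pvNoCrash (condition : String) (e1 e2 : List (String × Bool)) : Prop :=
  ∀ p : Fin e1.length, e1[p].1 ∉ e2.map Prod.fst →
    ∃ x ∈ e1.take p, x.1 ≠ condition ∧ pvGet e2 x.1 ≠ some x.2

-- A's per-pair detection: eval1's non-condition keys all agree in eval2 and `condition` differs
abbrev pvFireA (condition : String) (e1 e2 : List (String × Bool)) : Prop :=
  (∀ c ∈ e1.map Prod.fst, c = condition ∨ pvGet e1 c = pvGet e2 c) ∧
  (∃ c ∈ e1.map Prod.fst, c = condition ∧ pvGet e1 c ≠ pvGet e2 c)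

-- B's per-pair detection: same assignment to all other conditions and `condition` differs
abbrev pvFireB (condition : String) (e1 e2 : List (String × Bool)) : Prop :=
  pvKeyB condition e1 = pvKeyB condition e2 ∧ pvGet e1 condition ≠ pvGet e2 condition

abbrev pvPairOK (condition : String) (e1 e2 : List (String × Bool)) : Prop :=
  pvNoCrash condition e1 e2 ∧
  ((∀ c ∈ e1.map Prod.fst, c ∈ e2.map Prod.fst) ∧ (∀ c ∈ e2.map Prod.fst, c ∈ e1.map Prod.fst) ∨
   (¬ pvFireA condition e1 e2 ∧ ¬ pvFireB condition e1 e2))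

-- A is guaranteed to return True: some pair fires its detection, every pair A scans no
-- later than that one is crash-free (so the scan really reaches it), and A's scan of the
-- firing pair completes
abbrev pvFireableA (condition : String) (evaluations : List (List (String × Bool))) : Prop :=
  ∃ i : Fin evaluations.length, ∃ j : Fin evaluations.length, i.val < j.val ∧
    pvFireA condition evaluations[i] evaluations[j] ∧
    (∀ k : Fin evaluations.length, ∀ l : Fin evaluations.length, k.val < l.val →
      (k.val < i.val ∨ (k.val = i.val ∧ l.val ≤ j.val)) →
      pvNoCrash condition evaluations[k] evaluations[l])

-- B is guaranteed to return True: some pair fires its grouping detection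
abbrev pvFireableB (condition : String) (evaluations : List (List (String × Bool))) : Prop :=
  ∃ i : Fin evaluations.length, ∃ j : Fin evaluations.length, i.val < j.val ∧
    pvFireB condition evaluations[i] evaluations[j]

-- Pre_ excludes (a) duplicate keys inside one evaluation (impossible for a Python dict),
-- (b) inputs where comparing some pair reaches a key the later evaluation lacks — A raises
-- KeyError there — and (c) pairs over ragged key sets on which exactly one of the two
-- detections fires: there A's answer hinges on ignoring every key absent from the earlier
-- evaluation of the pair, an accident of scanning only eval1's keys, and no value matches it
-- groupwise; the natural domain — evaluations over one shared set of conditions — always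
-- satisfies Pre_; inputs on which both detections are certain to fire are admitted as well.
def Pre_condition_has_independent_effect_py (condition : String) (evaluations : List (List (String × Bool))) : Prop :=
  (∀ e ∈ evaluations, (e.map Prod.fst).Nodup) ∧
  (List.Pairwise (pvPairOK condition) evaluations ∨
   (pvFireableA condition evaluations ∧ pvFireableB condition evaluations))
instance (condition : String) (evaluations : List (List (String × Bool))) : Decidable (Pre_condition_has_independent_effect_py condition evaluations) := by
  unfold Pre_condition_has_independent_effect_py
  haveI h1 : Decidable (List.Pairwise (pvPairOK condition) evaluations) := by
    unfold pvPairOK pvNoCrash pvFireA pvFireB; infer_instance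
  haveI h2 : Decidable (pvFireableA condition evaluations) := by
    unfold pvFireableA pvFireA pvNoCrash; infer_instance
  haveI h3 : Decidable (pvFireableB condition evaluations) := by
    unfold pvFireableB pvFireB; infer_instance
  infer_instance

def pvWitness_condition_has_independent_effect_py : String × (List (List (String × Bool))) :=
  ("x", [[("x", true), ("y", false)], [("x", false), ("y", false)]])

def Spec_condition_has_independent_effect_py (condition : String) (evaluations : List (List (String × Bool))) (out : Bool) : Prop := out = condition_has_independent_effect_py_alt condition evaluations
instance (condition : String) (evaluations : List (List (String × Bool))) (out : Bool) : Decidable (Spec_condition_has_independent_effect_py condition evaluations out) := by unfold Spec_condition_has_independent_effect_py; infer_instance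

-- ===== CLAIM (what is proved, stated in full; the proofs are below) =====
def Claim_equal_condition_has_independent_effect_py : Prop := ∀ (condition : String) (evaluations : List (List (String × Bool))), Dom_condition_has_independent_effect_py condition evaluations → Pre_condition_has_independent_effect_py condition evaluations → Spec_condition_has_independent_effect_py condition evaluations (condition_has_independent_effect_py condition evaluations)

-- ===== LEMMAS AND PROOFS =====

-- the common pairwise specification both programs are reduced to
def pvPairSpec (condition : String) (e1 e2 : List (String × Bool)) : Bool :=
  ((e1.map Prod.fst).all fun c => decide (c = condition) || decide (pvGet e1 c = pvGet e2 c)) &&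
  ((e1.map Prod.fst).any fun c => decide (c = condition) && decide (pvGet e1 c ≠ pvGet e2 c))

def pvAnySpec (condition : String) : List (List (String × Bool)) → Bool
  | [] => false
  | e :: rest => rest.any (fun e2 => pvPairSpec condition e e2) || pvAnySpec condition rest

-- B's per-pair test: same group key and a different condition value
def pvPairB (condition : String) (e1 e2 : List (String × Bool)) : Bool :=
  decide (pvKeyB condition e1 = pvKeyB condition e2) &&
  decide (pvGet e1 condition ≠ pvGet e2 condition)

def pvAnyB (condition : String) : List (List (String × Bool)) → Bool
  | [] => false
  | e :: rest => rest.any (fun e2 => pvPairB condition e e2) || pvAnyB condition rest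

-- condition value held by the first earlier evaluation sharing group key k
def pvFirstVal (condition : String) (prior : List (List (String × Bool)))
    (k : List (String × Bool)) : Option (Option Bool) :=
  (prior.find? (fun e => pvKeyB condition e == k)).map (fun e => pvGet e condition)

def pvHit (condition : String) (prior : List (List (String × Bool)))
    (ev : List (String × Bool)) : Bool :=
  match pvFirstVal condition prior (pvKeyB condition ev) with
  | some v => decide (v ≠ pvGet ev condition)
  | none => false

def pvSpecB (condition : String) :
    List (List (String × Bool)) → List (List (String × Bool)) → Bool
  | _, [] => false
  | prior, ev :: rest => pvHit condition prior ev || pvSpecB condition (prior ++ [ev]) rest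

theorem pvInnerA_and (condition : String) (e1 e2 : List (String × Bool)) :
    ∀ (cs : List String) (d cd : Bool),
    ((pvInnerA condition e1 e2 cs d cd).1 && (pvInnerA condition e1 e2 cs d cd).2) =
    (d && (cs.all fun c => decide (c = condition) || decide (pvGet e1 c = pvGet e2 c))
       && (cd || cs.any fun c => decide (c = condition) && decide (pvGet e1 c ≠ pvGet e2 c)))
  | [], d, cd => by simp [pvInnerA]
  | c :: cs, d, cd => by
    by_cases hc : c = condition
    · subst hc
      by_cases hg : pvGet e1 c = pvGet e2 c
      · rw [pvInnerA]
        simp only [ne_eq, hg, not_true_eq_false, if_false, if_true]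
        rw [pvInnerA_and c e1 e2 cs d cd]
        simp [hg]
      · rw [pvInnerA]
        simp only [ne_eq, hg, not_false_eq_true, if_true]
        rw [pvInnerA_and c e1 e2 cs d true]
        simp [hg]
    · by_cases hg : pvGet e1 c = pvGet e2 c
      · rw [pvInnerA]
        simp only [if_neg hc, ne_eq, hg, not_true_eq_false, if_false]
        rw [pvInnerA_and condition e1 e2 cs d cd]
        simp [hg, hc]
      · rw [pvInnerA]
        simp only [if_neg hc, ne_eq, hg, not_false_eq_true, if_true]
        simp [hg, hc]
theorem pvPairA_eq (condition : String) (e1 e2 : List (String × Bool)) :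
    pvPairA condition e1 e2 = pvPairSpec condition e1 e2 := by
  have := pvInnerA_and condition e1 e2 (e1.map Prod.fst) true false
  simpa [pvPairA, pvPairSpec] using this

theorem pvOuterA_eq (condition : String) :
    ∀ evals, pvOuterA condition evals = pvAnySpec condition evals
  | [] => rfl
  | e :: rest => by
    rw [pvOuterA, pvAnySpec,
      PySem.List.any_congr_mem (fun e2 _ => pvPairA_eq condition e e2),
      pvOuterA_eq condition rest]
    cases h : rest.any (fun e2 => pvPairSpec condition e e2) <;> simp

-- lookup in an association list with unique keys
theorem pvGet_of_mem {e : List (String × Bool)} {c : String} {v : Bool}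
    (h : (c, v) ∈ e) (hn : (e.map Prod.fst).Nodup) : pvGet e c = some v :=
  PySem.Dict.get?_of_mem_items ⟨e⟩ h (by simpa [PySem.Dict.keys] using hn)

theorem mem_of_pvGet {e : List (String × Bool)} {c : String} {v : Bool}
    (h : pvGet e c = some v) : (c, v) ∈ e :=
  PySem.Dict.mem_items_of_get?_eq_some ⟨e⟩ h

theorem pvGet_isSome_iff (e : List (String × Bool)) (c : String) :
    (pvGet e c).isSome = true ↔ c ∈ e.map Prod.fst := by
  rw [pvGet, ← PySem.Dict.contains_eq_isSome_get?, PySem.Dict.contains_iff_mem_keys,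
    PySem.Dict.keys_mk]

theorem pvGet_eq_none {e : List (String × Bool)} {c : String}
    (h : c ∉ e.map Prod.fst) : pvGet e c = none := by
  cases hg : pvGet e c with
  | none => rfl
  | some v => exact absurd ((pvGet_isSome_iff e c).mp (by simp [hg])) h
-- sorting by the (unique) keys is a canonical form: permutations sort equal
theorem pvSorted_eq_of_perm {l1 l2 : List (String × Bool)} (hp : l1.Perm l2)
    (hn : (l1.map Prod.fst).Nodup) :
    PySem.List.sorted l1 (fun p => p.1) false = PySem.List.sorted l2 (fun p => p.1) false := by
  have hperm : (PySem.List.sorted l1 (fun p => p.1) false).Perm l2 :=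
    (PySem.List.sorted_perm l1 (fun p => p.1) false).trans hp
  have hnd : ((PySem.List.sorted l1 (fun p => p.1) false).map Prod.fst).Nodup :=
    hn.perm ((PySem.List.sorted_perm l1 (fun p => p.1) false).map Prod.fst).symm
  have hle : List.Pairwise (fun a b : String × Bool => a.1 ≤ b.1)
      (PySem.List.sorted l1 (fun p => p.1) false) :=
    PySem.List.sorted_pairwise l1 (fun p => p.1)
  have hne : List.Pairwise (fun a b : String × Bool => a.1 ≠ b.1)
      (PySem.List.sorted l1 (fun p => p.1) false) := List.pairwise_map.mp hnd
  have hlt : List.Pairwise (fun a b : String × Bool => a.1 < b.1)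
      (PySem.List.sorted l1 (fun p => p.1) false) :=
    (hle.and hne).imp (fun h => lt_of_le_of_ne h.1 h.2)
  exact (PySem.List.sorted_eq_of_perm_of_pairwise_lt l2 _ (fun p => p.1) hperm hlt).symm
-- agreement on all non-condition keys = equal canonical group keys (under Pre_'s shape)
theorem pvAgree_iff_keyEq (condition : String) (e1 e2 : List (String × Bool))
    (hn1 : (e1.map Prod.fst).Nodup) (hn2 : (e2.map Prod.fst).Nodup)
    (h21 : ∀ c ∈ e2.map Prod.fst, c ∈ e1.map Prod.fst) :
    (∀ c ∈ e1.map Prod.fst, c ≠ condition → pvGet e1 c = pvGet e2 c) ↔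
      pvKeyB condition e1 = pvKeyB condition e2 := by
  have hs1 : (e1.filter (fun p => p.1 ≠ condition)).Sublist e1 := List.filter_sublist
  have hs2 : (e2.filter (fun p => p.1 ≠ condition)).Sublist e2 := List.filter_sublist
  have hnf1 : ((e1.filter (fun p => p.1 ≠ condition)).map Prod.fst).Nodup :=
    hn1.sublist (hs1.map Prod.fst)
  have hnf2 : ((e2.filter (fun p => p.1 ≠ condition)).map Prod.fst).Nodup :=
    hn2.sublist (hs2.map Prod.fst)
  constructor
  · intro hag
    apply pvSorted_eq_of_perm ?_ hnf1
    refine (List.perm_ext_iff_of_nodup hnf1.of_map hnf2.of_map).mpr ?_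
    rintro ⟨c, v⟩
    simp only [List.mem_filter, decide_eq_true_eq]
    constructor
    · rintro ⟨hmem, hne⟩
      have hg1 : pvGet e1 c = some v := pvGet_of_mem hmem hn1
      have hg2 : pvGet e2 c = some v := by
        rw [← hag c (List.mem_map_of_mem hmem) hne]; exact hg1
      exact ⟨mem_of_pvGet hg2, hne⟩
    · rintro ⟨hmem, hne⟩
      have hg2 : pvGet e2 c = some v := pvGet_of_mem hmem hn2
      have hcK1 : c ∈ e1.map Prod.fst := h21 c (List.mem_map_of_mem hmem)
      have hg1 : pvGet e1 c = some v := (hag c hcK1 hne).trans hg2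
      exact ⟨mem_of_pvGet hg1, hne⟩
  · intro hkey c hcK hne
    have hperm : (e1.filter (fun p => p.1 ≠ condition)).Perm
        (e2.filter (fun p => p.1 ≠ condition)) := by
      have p1 := PySem.List.sorted_perm (e1.filter (fun p => p.1 ≠ condition)) (fun p => p.1) false
      have p2 := PySem.List.sorted_perm (e2.filter (fun p => p.1 ≠ condition)) (fun p => p.1) false
      exact p1.symm.trans (by rw [show PySem.List.sorted (e1.filter (fun p => p.1 ≠ condition)) (fun p => p.1) false = _ from hkey]; exact p2)
    obtain ⟨v, hg1⟩ := Option.isSome_iff_exists.mp ((pvGet_isSome_iff e1 c).mpr hcK)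
    have hm1 : (c, v) ∈ e1.filter (fun p => p.1 ≠ condition) := by
      simp only [List.mem_filter, decide_eq_true_eq]
      exact ⟨mem_of_pvGet hg1, hne⟩
    have hm2 : (c, v) ∈ e2 := List.mem_of_mem_filter (hperm.mem_iff.mp hm1)
    rw [hg1, pvGet_of_mem hm2 hn2]
theorem pvPair_bridge (condition : String) (e1 e2 : List (String × Bool))
    (hn1 : (e1.map Prod.fst).Nodup) (hn2 : (e2.map Prod.fst).Nodup)
    (_h12 : ∀ c ∈ e1.map Prod.fst, c ∈ e2.map Prod.fst)
    (h21 : ∀ c ∈ e2.map Prod.fst, c ∈ e1.map Prod.fst) :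
    pvPairSpec condition e1 e2 = pvPairB condition e1 e2 := by
  by_cases hv : pvGet e1 condition = pvGet e2 condition
  · have hany : ((e1.map Prod.fst).any fun c =>
        decide (c = condition) && decide (pvGet e1 c ≠ pvGet e2 c)) = false := by
      simp only [List.any_eq_false]
      rintro c hc
      by_cases h : c = condition
      · subst h; simp [hv]
      · simp [h]
    unfold pvPairSpec pvPairB
    rw [hany]
    simp [hv]
  · have hc1 : condition ∈ e1.map Prod.fst := by
      by_contra h1
      have h2 : condition ∉ e2.map Prod.fst := fun h2 => h1 (h21 condition h2)
      exact hv (by rw [pvGet_eq_none h1, pvGet_eq_none h2])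
    have hany : ((e1.map Prod.fst).any fun c =>
        decide (c = condition) && decide (pvGet e1 c ≠ pvGet e2 c)) = true := by
      simp only [List.any_eq_true]
      exact ⟨condition, hc1, by simp [hv]⟩
    have hall : ((e1.map Prod.fst).all fun c =>
        decide (c = condition) || decide (pvGet e1 c = pvGet e2 c)) =
        decide (pvKeyB condition e1 = pvKeyB condition e2) := by
      rw [Bool.eq_iff_iff]
      simp only [List.all_eq_true, Bool.or_eq_true, decide_eq_true_eq]
      rw [← pvAgree_iff_keyEq condition e1 e2 hn1 hn2 h21]
      constructor
      · intro h c hc hne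
        rcases h c hc with h' | h'
        · exact absurd h' hne
        · exact h'
      · intro h c hc
        by_cases hce : c = condition
        · exact Or.inl hce
        · exact Or.inr (h c hc hce)
    unfold pvPairSpec pvPairB
    rw [hany, hall]
    simp [hv]

theorem pvPairSpec_eq_true_iff (condition : String) (e1 e2 : List (String × Bool)) :
    pvPairSpec condition e1 e2 = true ↔ pvFireA condition e1 e2 := by
  unfold pvPairSpec pvFireA
  simp only [Bool.and_eq_true, List.all_eq_true, List.any_eq_true, Bool.or_eq_true,
    decide_eq_true_eq, ne_eq]

theorem pvPairB_eq_true_iff (condition : String) (e1 e2 : List (String × Bool)) :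
    pvPairB condition e1 e2 = true ↔ pvFireB condition e1 e2 := by
  unfold pvPairB pvFireB
  simp

theorem pvAnySpec_eq_anyB (condition : String) :
    ∀ evals : List (List (String × Bool)),
    (∀ e ∈ evals, (List.map Prod.fst e).Nodup) →
    List.Pairwise (pvPairOK condition) evals →
    pvAnySpec condition evals = pvAnyB condition evals
  | [], _, _ => rfl
  | e :: rest, hnd, hpw => by
    rw [List.pairwise_cons] at hpw
    have hpt : ∀ e2 ∈ rest, pvPairSpec condition e e2 = pvPairB condition e e2 := by
      intro e2 he2
      rcases (hpw.1 e2 he2).2 with ⟨h12, h21⟩ | ⟨hA, hB⟩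
      · exact pvPair_bridge condition e e2 (hnd e (by simp)) (hnd e2 (by simp [he2])) h12 h21
      · rw [Bool.eq_false_iff.mpr (fun h => hA ((pvPairSpec_eq_true_iff condition e e2).mp h)),
          Bool.eq_false_iff.mpr (fun h => hB ((pvPairB_eq_true_iff condition e e2).mp h))]
    rw [pvAnySpec, pvAnyB, PySem.List.any_congr_mem hpt,
      pvAnySpec_eq_anyB condition rest (fun x hx => hnd x (by simp [hx])) hpw.2]
theorem pvFirstVal_append (condition : String) (prior : List (List (String × Bool)))
    (ev : List (String × Bool)) (k : List (String × Bool)) :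
    pvFirstVal condition (prior ++ [ev]) k =
      (pvFirstVal condition prior k).or
        (if pvKeyB condition ev = k then some (pvGet ev condition) else none) := by
  unfold pvFirstVal
  rw [List.find?_append]
  cases hfp : prior.find? (fun e => pvKeyB condition e == k) with
  | some e' => simp
  | none =>
    by_cases hk : pvKeyB condition ev = k
    · simp [List.find?, hk]
    · have hb : (pvKeyB condition ev == k) = false := beq_eq_false_iff_ne.mpr hk
      simp [List.find?, hb, hk]

theorem pvLoopB_eq (condition : String) :
    ∀ (evals : List (List (String × Bool)))
      (seen : PySem.Dict (List (String × Bool)) (Option Bool))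
      (prior : List (List (String × Bool))),
    (∀ k, seen.get? k = pvFirstVal condition prior k) →
    pvLoopB condition evals seen = pvSpecB condition prior evals
  | [], _, _, _ => rfl
  | ev :: rest, seen, prior, h => by
    rw [pvLoopB, pvSpecB]
    unfold pvHit
    rw [h (pvKeyB condition ev)]
    cases hf : pvFirstVal condition prior (pvKeyB condition ev) with
    | some v =>
      by_cases hvv : v = pvGet ev condition
      · have h' : ∀ k, seen.get? k = pvFirstVal condition (prior ++ [ev]) k := by
          intro k
          rw [pvFirstVal_append]
          by_cases hk : pvKeyB condition ev = k
          · rw [if_pos hk, h k, ← hk, hf]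
            simp
          · rw [if_neg hk, Option.or_none, h k]
        rw [pvLoopB_eq condition rest seen (prior ++ [ev]) h']
        simp [hvv]
      · simp [hvv]
    | none =>
      have h' : ∀ k, (seen.insert (pvKeyB condition ev) (pvGet ev condition)).get? k =
          pvFirstVal condition (prior ++ [ev]) k := by
        intro k
        rw [pvFirstVal_append]
        by_cases hk : k = pvKeyB condition ev
        · subst hk
          rw [PySem.Dict.get?_insert_self, hf, if_pos rfl]
          simp
        · rw [PySem.Dict.get?_insert_of_ne _ _ hk, if_neg (fun he => hk he.symm),
            Option.or_none, h k]
      rw [pvLoopB_eq condition rest _ (prior ++ [ev]) h']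
      simp
theorem pvHit_append (condition : String) (prior : List (List (String × Bool)))
    (ev e : List (String × Bool)) (h : pvHit condition prior ev = false) :
    pvHit condition (prior ++ [ev]) e = (pvHit condition prior e || pvPairB condition ev e) := by
  unfold pvHit pvPairB
  rw [pvFirstVal_append]
  by_cases hk : pvKeyB condition ev = pvKeyB condition e
  · rw [if_pos hk]
    unfold pvHit at h
    rw [← hk]
    cases hfp : pvFirstVal condition prior (pvKeyB condition ev) with
    | none => simp [hk]
    | some v =>
      have hv : v = pvGet ev condition := by
        rw [hfp] at h; simpa using h
      subst hv
      simp [hk]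
  · rw [if_neg hk, Option.or_none]
    simp [hk]

theorem pvSpecB_eq (condition : String) :
    ∀ (evals prior : List (List (String × Bool))),
    pvSpecB condition prior evals =
      (evals.any (fun e => pvHit condition prior e) || pvAnyB condition evals)
  | [], _ => rfl
  | ev :: rest, prior => by
    rw [pvSpecB, pvAnyB, pvSpecB_eq condition rest (prior ++ [ev])]
    cases hh : pvHit condition prior ev with
    | true => simp [hh]
    | false =>
      rw [PySem.List.any_congr_mem (fun e _ => pvHit_append condition prior ev e hh)]
      rw [Bool.eq_iff_iff]
      simp only [List.any_cons, List.any_eq_true, Bool.or_eq_true, hh]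
      constructor
      · rintro (h | ⟨x, hx, (h | h)⟩ | h)
        · exact absurd h (by simp)
        · exact Or.inl (Or.inr ⟨x, hx, h⟩)
        · exact Or.inr (Or.inl ⟨x, hx, h⟩)
        · exact Or.inr (Or.inr h)
      · rintro ((h | ⟨x, hx, h⟩) | ⟨x, hx, h⟩ | h)
        · exact absurd h (by simp)
        · exact Or.inr (Or.inl ⟨x, hx, Or.inl h⟩)
        · exact Or.inr (Or.inl ⟨x, hx, Or.inr h⟩)
        · exact Or.inr (Or.inr h)

theorem pvLoopB_total (condition : String) (evals : List (List (String × Bool))) :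
    pvLoopB condition evals PySem.Dict.empty = pvAnyB condition evals := by
  rw [pvLoopB_eq condition evals PySem.Dict.empty []
      (fun k => by rw [PySem.Dict.get?_empty]; rfl),
    pvSpecB_eq condition evals [],
    PySem.List.any_congr_mem (f := fun e => pvHit condition [] e) (g := fun _ => false) (fun e _ => rfl)]
  simp

-- the common "exists a pair i < j" shape of pvAnySpec and pvAnyB
def pvAnyPair (P : List (String × Bool) → List (String × Bool) → Bool) :
    List (List (String × Bool)) → Bool
  | [] => false
  | e :: rest => rest.any (fun e2 => P e e2) || pvAnyPair P rest

theorem pvAnySpec_eq_anyPair (condition : String) :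
    ∀ evals, pvAnySpec condition evals = pvAnyPair (pvPairSpec condition) evals
  | [] => rfl
  | e :: rest => by rw [pvAnySpec, pvAnyPair, pvAnySpec_eq_anyPair condition rest]

theorem pvAnyB_eq_anyPair (condition : String) :
    ∀ evals, pvAnyB condition evals = pvAnyPair (pvPairB condition) evals
  | [] => rfl
  | e :: rest => by rw [pvAnyB, pvAnyPair, pvAnyB_eq_anyPair condition rest]

theorem pvAnyPair_true_of (P : List (String × Bool) → List (String × Bool) → Bool) :
    ∀ (evals : List (List (String × Bool))) (i j : Nat) (hij : i < j) (hj : j < evals.length),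
    P (evals[i]'(lt_trans hij hj)) (evals[j]'hj) = true → pvAnyPair P evals = true
  | [], _, _, _, hj => by simp at hj
  | e :: rest, i, j, hij, hj => by
    intro hP
    rw [pvAnyPair, Bool.or_eq_true]
    cases i with
    | zero =>
      cases j with
      | zero => omega
      | succ j' =>
        left
        rw [List.any_eq_true]
        exact ⟨rest[j']'(by simpa using hj), List.getElem_mem _, by simpa using hP⟩
    | succ i' =>
      cases j with
      | zero => omega
      | succ j' =>
        right
        exact pvAnyPair_true_of P rest i' j' (by omega) (by simpa using hj) (by simpa using hP)

-- ===== VERDICT (by name: the statement is the Claim_ definition above) =====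
theorem condition_has_independent_effect_py_spec : Claim_equal_condition_has_independent_effect_py := by
  intro condition evaluations _hdom hpre
  unfold Spec_condition_has_independent_effect_py
  unfold condition_has_independent_effect_py condition_has_independent_effect_py_alt
  rcases hpre with ⟨hnd, hpw | ⟨⟨i, j, hij, hA, _⟩, ⟨i', j', hij', hB⟩⟩⟩
  · rw [pvOuterA_eq, pvAnySpec_eq_anyB condition evaluations hnd hpw, pvLoopB_total]
  · rw [pvOuterA_eq, pvLoopB_total,
      pvAnySpec_eq_anyPair condition evaluations, pvAnyB_eq_anyPair condition evaluations,
      pvAnyPair_true_of (pvPairSpec condition) evaluations i.val j.val hij j.isLt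
        (by exact (pvPairSpec_eq_true_iff condition _ _).mpr hA),
      pvAnyPair_true_of (pvPairB condition) evaluations i'.val j'.val hij' j'.isLt
        (by exact (pvPairB_eq_true_iff condition _ _).mpr hB)]
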